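-- pv_equiv track=rewrite | github.com/srikirancse/EPIJudge | epi_judge_python_solutions/microsoft_oa_questions.py | deletions_to_no_triplets
-- ===== SOURCE A (Python) =====
-- def deletions_to_no_triplets(s):
--     result, i = 0, 1
--     while i < len(s):
--         count = 1
--         while i < len(s) and s[i - 1] == s[i]:
--             count += 1
--             if count % 3 == 0:
--                 result += 1
--             i += 1
--         i += 1
--     return result
-- ===== SOURCE B (Python) =====
-- def deletions_to_no_triplets(s):
--     # Count greedy non-overlapping triples of equal adjacent characters:
--     # each disjoint triple costs exactly one deletion.  On a triple the scan
--     # jumps past it (i += 3), otherwise it advances one character.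
--     result = 0
--     i = 0
--     while i + 2 < len(s):
--         if s[i] == s[i + 1] == s[i + 2]:
--             result += 1
--             i += 3
--         else:
--             i += 1
--     return result
-- ===== Notes on version B (the rewrite author's own statement) =====
-- stated objective: alternative
-- what changed: Instead of A's nested while loops tracking a run counter and incrementing at every count%3==0, B makes one flat scan counting greedy non-overlapping triples of equal adjacent characters, jumping 3 positions past each triple found (each disjoint triple = one deletion); no run counter, modulo or division.
import Mathlib
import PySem

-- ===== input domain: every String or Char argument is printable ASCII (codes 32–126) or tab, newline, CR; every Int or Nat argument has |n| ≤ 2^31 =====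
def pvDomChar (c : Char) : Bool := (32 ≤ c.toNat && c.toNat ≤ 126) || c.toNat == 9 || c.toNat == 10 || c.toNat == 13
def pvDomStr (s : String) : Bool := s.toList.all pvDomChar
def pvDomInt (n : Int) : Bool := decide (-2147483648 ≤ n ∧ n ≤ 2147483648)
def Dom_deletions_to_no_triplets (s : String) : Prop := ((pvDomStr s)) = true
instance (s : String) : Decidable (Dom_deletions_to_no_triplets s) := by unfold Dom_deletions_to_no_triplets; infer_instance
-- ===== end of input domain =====

-- B replaces A's nested while loops (run counter incremented at each count % 3 == 0)
-- by one flat scan counting greedy non-overlapping triples of equal adjacent characters,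
-- jumping past each triple found; same O(n) cost, a different characterisation.


-- ===== PORT A =====
-- inner while loop: `while i < len(s) and s[i-1] == s[i]: count += 1; if count % 3 == 0: result += 1; i += 1`
-- (the guard guarantees both indices are in range, so `getD` with a dummy default is exact there;
-- fuel = current list length at each call site, enough for every iteration: it only makes the loop total)
def aInner (fuel : Nat) (l : List Char) (i : Nat) (count result : Int) : Nat × Int :=
  match fuel with
  | 0 => (i, result)
  | f + 1 =>
    if i < l.length ∧ l.getD (i - 1) 'a' = l.getD i 'a' then
      aInner f l (i + 1) (count + 1) (if (count + 1) % 3 = 0 then result + 1 else result)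
    else (i, result)

-- outer while loop: `while i < len(s): count = 1; <inner>; i += 1` (fuel as above)
def aOuter (fuel : Nat) (l : List Char) (i : Nat) (result : Int) : Int :=
  match fuel with
  | 0 => result
  | f + 1 =>
    if i < l.length then
      aOuter f l ((aInner l.length l i 1 result).1 + 1) (aInner l.length l i 1 result).2
    else result

def deletions_to_no_triplets (s : String) : Int := aOuter s.toList.length s.toList 1 0

-- ===== PORT B =====
-- Source B's scan `while i + 2 < len(s)` as recursion on the unread suffix: a window of
-- three equal chars counts 1 and the scan jumps past it (i += 3), else it steps one char
def goB : List Char → Int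
  | a :: b :: c :: rest => if a = b ∧ b = c then 1 + goB rest else goB (b :: c :: rest)
  | _ => 0

def deletions_to_no_triplets_alt (s : String) : Int := goB s.toList

-- ===== PRECONDITION & SPEC =====
def Spec_deletions_to_no_triplets (s : String) (out : Int) : Prop := out = deletions_to_no_triplets_alt s
instance (s : String) (out : Int) : Decidable (Spec_deletions_to_no_triplets s out) := by unfold Spec_deletions_to_no_triplets; infer_instance

-- ===== CLAIM (what is proved, stated in full; the proofs are below) =====
def Claim_equal_deletions_to_no_triplets : Prop := ∀ (s : String), Dom_deletions_to_no_triplets s → Spec_deletions_to_no_triplets s (deletions_to_no_triplets s)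

-- ===== LEMMAS AND PROOFS =====

-- every nonempty list is a maximal constant prefix followed by a rest starting differently
theorem run_decomp (c : Char) (cs : List Char) :
    ∃ k rest, c :: cs = List.replicate (k + 1) c ++ rest ∧ rest.head? ≠ some c := by
  induction cs generalizing c with
  | nil => exact ⟨0, [], by simp⟩
  | cons d cs' ih =>
    by_cases hdc : d = c
    · subst hdc
      obtain ⟨k, rest, heq, hne⟩ := ih d
      exact ⟨k + 1, rest, by simpa [List.replicate_succ] using congrArg (d :: ·) heq, hne⟩
    · exact ⟨0, d :: cs', by simp, by simp [hdc]⟩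

-- the index never decreases across the inner loop
theorem aInner_ge (f : Nat) : ∀ (l : List Char) (i : Nat) (c r : Int),
    i ≤ (aInner f l i c r).1 := by
  induction f with
  | zero => intro l i c r; simp [aInner]
  | succ f ih =>
    intro l i c r
    simp only [aInner]
    split
    · exact le_trans (by omega) (ih l (i + 1) _ _)
    · simp

-- with the SAME fuel, prepending a head and shifting the index (≥ 1) shifts the result index
theorem aInner_shift (f : Nat) : ∀ (x : Char) (l : List Char) (i : Nat) (c r : Int), 1 ≤ i →
    aInner f (x :: l) (i + 1) c r = ((aInner f l i c r).1 + 1, (aInner f l i c r).2) := by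
  induction f with
  | zero => intro x l i c r hi; simp [aInner]
  | succ f ih =>
    intro x l i c r hi
    obtain ⟨j, rfl⟩ : ∃ j, i = j + 1 := ⟨i - 1, by omega⟩
    have hguard : ((j + 1 + 1 < (x :: l).length ∧ (x :: l).getD (j + 1 + 1 - 1) 'a' = (x :: l).getD (j + 1 + 1) 'a')
        ↔ (j + 1 < l.length ∧ l.getD (j + 1 - 1) 'a' = l.getD (j + 1) 'a')) := by
      simp only [List.length_cons]
      constructor
      · rintro ⟨h1, h2⟩; exact ⟨by omega, by simpa using h2⟩
      · rintro ⟨h1, h2⟩; exact ⟨by omega, by simpa using h2⟩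
    simp only [aInner]
    by_cases hg : j + 1 < l.length ∧ l.getD (j + 1 - 1) 'a' = l.getD (j + 1) 'a'
    · rw [if_pos (hguard.mpr hg), if_pos hg]
      exact ih x l (j + 2) _ _ (by omega)
    · rw [if_neg (fun h => hg (hguard.mp h)), if_neg hg]

-- any two sufficient fuels give the same inner result
theorem aInner_irrel (f1 : Nat) : ∀ (f2 : Nat) (l : List Char) (i : Nat) (c r : Int),
    l.length - i ≤ f1 → l.length - i ≤ f2 → aInner f1 l i c r = aInner f2 l i c r := by
  induction f1 with
  | zero =>
    intro f2 l i c r h1 h2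
    cases f2 with
    | zero => rfl
    | succ f2 => simp only [aInner]; rw [if_neg (by rintro ⟨h, -⟩; omega)]
  | succ f1 ih =>
    intro f2 l i c r h1 h2
    cases f2 with
    | zero => simp only [aInner]; rw [if_neg (by rintro ⟨h, -⟩; omega)]
    | succ f2 =>
      simp only [aInner]
      by_cases hg : i < l.length ∧ l.getD (i - 1) 'a' = l.getD i 'a'
      · rw [if_pos hg, if_pos hg]
        exact ih f2 l (i + 1) _ _ (by omega) (by omega)
      · rw [if_neg hg, if_neg hg]

-- the accumulator distributes out of the inner loop
theorem aInner_add (f : Nat) : ∀ (l : List Char) (i : Nat) (c a : Int),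
    aInner f l i c a = ((aInner f l i c 0).1, a + (aInner f l i c 0).2) := by
  induction f with
  | zero => intro l i c a; simp [aInner]
  | succ f ih =>
    intro l i c a
    simp only [aInner]
    by_cases hg : i < l.length ∧ l.getD (i - 1) 'a' = l.getD i 'a'
    · rw [if_pos hg, if_pos hg]
      rw [ih l (i + 1) (c + 1), ih l (i + 1) (c + 1) (if (c + 1) % 3 = 0 then (0:Int) + 1 else 0)]
      simp only [Prod.mk.injEq]
      exact ⟨by trivial, by split_ifs <;> ring⟩
    · rw [if_neg hg, if_neg hg]
      simp

-- same-fuel shift for the outer loop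
theorem aOuter_shift (f : Nat) : ∀ (x : Char) (l : List Char) (i : Nat) (r : Int), 1 ≤ i →
    aOuter f (x :: l) (i + 1) r = aOuter f l i r := by
  induction f with
  | zero => intro x l i r hi; rfl
  | succ f ih =>
    intro x l i r hi
    simp only [aOuter]
    by_cases hg : i < l.length
    · rw [if_pos (by simp; omega), if_pos hg]
      rw [show (x :: l).length = l.length + 1 by simp]
      rw [aInner_shift (l.length + 1) x l i 1 r hi]
      rw [aInner_irrel (l.length + 1) l.length l i 1 r (by omega) (by omega)]
      exact ih x l ((aInner l.length l i 1 r).1 + 1) _ (by omega)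
    · rw [if_neg (by simp; omega), if_neg hg]

theorem aOuter_drop (j : Nat) : ∀ (f : Nat) (l : List Char) (r : Int),
    aOuter f l (j + 1) r = aOuter f (l.drop j) 1 r := by
  induction j with
  | zero => intro f l r; simp
  | succ j ih =>
    intro f l r
    cases l with
    | nil =>
      cases f with
      | zero => rfl
      | succ f => simp [aOuter]
    | cons x l' =>
      rw [show j + 1 + 1 = (j + 1) + 1 from rfl, aOuter_shift f x l' (j + 1) r (by omega), ih]
      simp

-- any two sufficient fuels give the same outer result
theorem aOuter_irrel (n : Nat) : ∀ (f1 f2 : Nat) (l : List Char) (i : Nat) (r : Int),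
    l.length - i ≤ n → l.length - i ≤ f1 → l.length - i ≤ f2 →
    aOuter f1 l i r = aOuter f2 l i r := by
  induction n with
  | zero =>
    intro f1 f2 l i r h0 h1 h2
    have hg : ¬ i < l.length := by omega
    cases f1 <;> cases f2 <;> simp only [aOuter, if_neg hg]
  | succ n ih =>
    intro f1 f2 l i r h0 h1 h2
    cases f1 with
    | zero =>
      cases f2 with
      | zero => rfl
      | succ f2 => simp only [aOuter]; rw [if_neg (by omega)]
    | succ f1 =>
      cases f2 with
      | zero => simp only [aOuter]; rw [if_neg (by omega)]
      | succ f2 =>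
        simp only [aOuter]
        by_cases hg : i < l.length
        · rw [if_pos hg, if_pos hg]
          have hge := aInner_ge l.length l i 1 r
          exact ih f1 f2 l ((aInner l.length l i 1 r).1 + 1) _ (by omega) (by omega) (by omega)
        · rw [if_neg hg, if_neg hg]

-- the accumulator distributes out of the outer loop
theorem aOuter_add (f : Nat) : ∀ (l : List Char) (i : Nat) (a : Int),
    aOuter f l i a = a + aOuter f l i 0 := by
  induction f with
  | zero => intro l i a; simp [aOuter]
  | succ f ih =>
    intro l i a
    simp only [aOuter]
    by_cases hg : i < l.length
    · rw [if_pos hg, if_pos hg]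
      rw [aInner_add l.length l i 1 a]
      rw [ih l ((aInner l.length l i 1 0).1 + 1) _,
          ih l ((aInner l.length l i 1 0).1 + 1) (aInner l.length l i 1 0).2]
      ring
    · rw [if_neg hg, if_neg hg]
      simp

-- with fuel = list length, the inner loop starting at index 1 with count = n+1 scans exactly the first run
theorem aInner_run (k : Nat) : ∀ (c : Char) (rest : List Char) (n : Nat) (r : Int),
    rest.head? ≠ some c →
    aInner (k + 1 + rest.length) (List.replicate (k + 1) c ++ rest) 1 ((n : Int) + 1) r
      = (k + 1, r + (((n + 1 + k) / 3 - (n + 1) / 3 : Nat) : Int)) := by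
  induction k with
  | zero =>
    intro c rest n r h
    rw [show 0 + 1 + rest.length = rest.length + 1 from by omega]
    simp only [aInner]
    rw [if_neg ?_]
    · simp
    · rcases rest with _ | ⟨d, ds⟩
      · simp
      · rintro ⟨-, h2⟩
        simp at h2 h
        exact h h2.symm
  | succ k ih =>
    intro c rest n r h
    rw [show k + 1 + 1 + rest.length = (k + 1 + rest.length) + 1 from by omega]
    simp only [aInner]
    rw [if_pos ?_]
    · rw [show ((n:Int) + 1 + 1) = (((n + 1 : Nat) : Int)) + 1 by push_cast; ring]
      have hs : (List.replicate (k + 1 + 1) c ++ rest) = c :: (List.replicate (k + 1) c ++ rest) := by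
        simp [List.replicate_succ]
      rw [hs, aInner_shift (k + 1 + rest.length) c _ 1 _ _ (by omega)]
      rw [ih c rest (n + 1) _ h]
      simp only [Prod.mk.injEq]
      refine ⟨by simp, ?_⟩
      split_ifs with h3 <;> omega
    · refine ⟨by simp [List.replicate_succ], ?_⟩
      simp [List.replicate_succ]

theorem aInner_run1 (k : Nat) (c : Char) (rest : List Char) (h : rest.head? ≠ some c) :
    aInner (k + 1 + rest.length) (List.replicate (k + 1) c ++ rest) 1 1 0
      = (k + 1, (((k + 1) / 3 : Nat) : Int)) := by
  have h1 := aInner_run k c rest 0 0 h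
  have h2 : (0 + 1 + k) / 3 - (0 + 1) / 3 = (k + 1) / 3 := by omega
  rw [h2] at h1
  simpa using h1

-- B side: stepping one char into a list not starting a triple with c
theorem goB_one (c : Char) (rest : List Char) (h : rest.head? ≠ some c) :
    goB (c :: rest) = goB rest := by
  rcases rest with _ | ⟨d, ds⟩
  · simp [goB]
  · rcases ds with _ | ⟨e, es⟩
    · simp [goB]
    · have hdc : d ≠ c := by simpa using fun h' => h (by simp [h'])
      simp only [goB]
      rw [if_neg (by rintro ⟨h1, -⟩; exact hdc h1.symm)]

-- the greedy triple scan finds exactly ⌊m/3⌋ triples inside a maximal run of length m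
theorem goB_run (m : Nat) (c : Char) (rest : List Char) (h : rest.head? ≠ some c) :
    goB (List.replicate m c ++ rest) = ((m / 3 : Nat) : Int) + goB rest := by
  induction m using Nat.strong_induction_on with
  | _ m ih =>
    match m with
    | 0 => simp
    | 1 => simpa using goB_one c rest h
    | 2 =>
      have h2 : List.replicate 2 c ++ rest = c :: c :: rest := by simp [List.replicate_succ]
      rw [h2]
      rcases rest with _ | ⟨d, ds⟩
      · simp [goB]
      · have hdc : d ≠ c := by simpa using fun h' => h (by simp [h'])
        simp only [goB]
        rw [if_neg (by rintro ⟨-, h1⟩; exact hdc h1.symm)]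
        simpa using goB_one c (d :: ds) h
    | (k + 3) =>
      have h3 : List.replicate (k + 3) c ++ rest
          = c :: c :: c :: (List.replicate k c ++ rest) := by
        simp [List.replicate_succ]
      rw [h3]
      simp only [goB]
      rw [if_pos ⟨trivial, trivial⟩, ih k (by omega)]
      push_cast [show (k + 3) / 3 = k / 3 + 1 from by omega]
      ring

theorem main_equiv (n : Nat) : ∀ l : List Char, l.length ≤ n → aOuter l.length l 1 0 = goB l := by
  induction n with
  | zero =>
    intro l hl
    have hl0 : l = [] := List.length_eq_zero_iff.mp (by omega)
    subst hl0
    simp [aOuter, goB]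
  | succ n ih =>
    intro l hl
    cases l with
    | nil => simp [aOuter, goB]
    | cons c cs =>
      obtain ⟨k, rest, heq, hne⟩ := run_decomp c cs
      rw [heq]
      have hlen : (c :: cs).length = k + 1 + rest.length := by rw [heq]; simp
      have hrest : rest.length ≤ n := by simp at hl hlen; omega
      rw [goB_run (k + 1) c rest hne]
      have hL : (List.replicate (k + 1) c ++ rest).length = k + 1 + rest.length := by simp
      rw [hL]
      by_cases htriv : k = 0 ∧ rest = []
      · obtain ⟨rfl, rfl⟩ := htriv
        simp [aOuter, goB]
      · have hf : k + 1 + rest.length = (k + rest.length) + 1 := by omega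
        rw [hf]
        simp only [aOuter]
        rw [if_pos (by rw [hL]; rcases rest with _ | _ <;> simp_all; omega)]
        rw [hL, show k + 1 + rest.length = k + 1 + rest.length from rfl]
        rw [aInner_run1 k c rest hne]
        rw [aOuter_drop (k + 1) (k + rest.length) _ _]
        rw [List.drop_left' (by simp)]
        rw [aOuter_irrel rest.length (k + rest.length) rest.length rest 1 _
              (by omega) (by omega) (by omega)]
        rw [aOuter_add rest.length rest 1 _]
        rw [ih rest hrest]
-- ===== VERDICT (by name: the statement is the Claim_ definition above) =====
theorem deletions_to_no_triplets_spec : Claim_equal_deletions_to_no_triplets := by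
  intro s _
  unfold Spec_deletions_to_no_triplets deletions_to_no_triplets deletions_to_no_triplets_alt
  exact main_equiv s.toList.length s.toList le_rfl
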